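-- pv_equiv track=rewrite | github.com/neutrons/addie | addie/autoNOM/run_step1.py | retrieve_last_incremented_index
-- ===== SOURCE A (Python) =====
-- def retrieve_last_incremented_index(list_folder):
--     _list_index = []
--     for _folder in list_folder:
--         _folder_split = _folder.split('_')
--         if len(_folder_split) > 1:
--             try:
--                 # checking that the variable is an integer
--                 _list_index.append(int(_folder_split[1]))
--             except:
--                 pass
--
--     if _list_index == []:
--         return -1
--
--     _list_index.sort()
--     return(_list_index[-1])
-- ===== SOURCE B (Python) =====
-- def retrieve_last_incremented_index(list_folder):
--     best = None
--     for folder in list_folder: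
--         parts = folder.split('_')
--         if len(parts) > 1:
--             try:
--                 value = int(parts[1])
--             except:
--                 continue
--             best = value if best is None else max(best, value)
--     return -1 if best is None else best
-- ===== Notes on version B (the rewrite author's own statement) =====
-- stated objective: simpler
-- what changed: Replaces the collect-then-sort-then-take-last pipeline with a single pass keeping a running maximum in an Option (None sentinel), so no intermediate list and no sort.
import Mathlib
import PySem

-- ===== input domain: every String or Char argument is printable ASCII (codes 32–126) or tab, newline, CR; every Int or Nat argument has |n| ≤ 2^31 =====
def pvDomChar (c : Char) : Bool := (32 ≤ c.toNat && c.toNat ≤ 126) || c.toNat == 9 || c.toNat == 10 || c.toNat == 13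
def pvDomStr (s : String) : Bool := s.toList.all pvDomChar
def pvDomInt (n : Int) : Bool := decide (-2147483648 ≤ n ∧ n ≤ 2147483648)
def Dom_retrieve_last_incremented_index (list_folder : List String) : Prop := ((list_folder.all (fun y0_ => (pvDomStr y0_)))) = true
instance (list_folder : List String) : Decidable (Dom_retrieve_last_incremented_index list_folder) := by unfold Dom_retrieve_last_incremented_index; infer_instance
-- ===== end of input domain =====

-- B replaces A's collect-list / sort / take-last pipeline by a single pass keeping a
-- running maximum in an Option (none = nothing parsed yet); same return value everywhere.

-- ===== PORT A =====
-- s.split('_'): separator is the nonempty literal "_", so split? is always some; getD [] is exact.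
def retrieve_last_incremented_index (list_folder : List String) : Int :=
  let _list_index : List Int :=
    list_folder.foldl (fun acc _folder =>
      let _folder_split := (PySem.Str.split? _folder "_").getD []
      if _folder_split.length > 1 then
        match PySem.Int.ofStr? (PySem.List.pyGetD _folder_split 1 "") with
        | some n => acc ++ [n]        -- append on success
        | none => acc                 -- except: pass
      else acc) []
  if _list_index = [] then -1
  else PySem.List.pyGetD (PySem.List.sorted _list_index id) (-1) 0

-- ===== PORT B =====
def retrieve_last_incremented_index_alt (list_folder : List String) : Int :=
  let best : Option Int :=
    list_folder.foldl (fun best folder =>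
      let parts := (PySem.Str.split? folder "_").getD []
      if parts.length > 1 then
        match PySem.Int.ofStr? (PySem.List.pyGetD parts 1 "") with
        | some value =>
            match best with
            | none => some value
            | some b => some (max b value)
        | none => best                -- except: continue
      else best) none
  match best with
  | none => -1
  | some b => b

-- ===== PRECONDITION & SPEC =====
def Spec_retrieve_last_incremented_index (list_folder : List String) (out : Int) : Prop := out = retrieve_last_incremented_index_alt list_folder
instance (list_folder : List String) (out : Int) : Decidable (Spec_retrieve_last_incremented_index list_folder out) := by unfold Spec_retrieve_last_incremented_index; infer_instance

-- ===== CLAIM (what is proved, stated in full; the proofs are below) =====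
def Claim_equal_retrieve_last_incremented_index : Prop := ∀ (list_folder : List String), Dom_retrieve_last_incremented_index list_folder → Spec_retrieve_last_incremented_index list_folder (retrieve_last_incremented_index list_folder)

-- ===== LEMMAS AND PROOFS =====

/-- The per-folder parse both programs perform. -/
def pvParse (f : String) : Option Int :=
  let parts := (PySem.Str.split? f "_").getD []
  if parts.length > 1 then PySem.Int.ofStr? (PySem.List.pyGetD parts 1 "") else none

lemma stepA_eq (acc : List Int) (f : String) :
    (if ((PySem.Str.split? f "_").getD []).length > 1 then
       match PySem.Int.ofStr? (PySem.List.pyGetD ((PySem.Str.split? f "_").getD []) 1 "") with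
       | some n => acc ++ [n]
       | none => acc
     else acc) = acc ++ (pvParse f).toList := by
  unfold pvParse
  by_cases h : ((PySem.Str.split? f "_").getD []).length > 1
  · simp only [h, if_pos]
    cases PySem.Int.ofStr? (PySem.List.pyGetD ((PySem.Str.split? f "_").getD []) 1 "") <;> simp
  · simp [h]

lemma stepB_eq (best : Option Int) (f : String) :
    (if ((PySem.Str.split? f "_").getD []).length > 1 then
       match PySem.Int.ofStr? (PySem.List.pyGetD ((PySem.Str.split? f "_").getD []) 1 "") with
       | some value =>
           match best with
           | none => some value
           | some b => some (max b value)
       | none => best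
     else best) =
    (pvParse f).toList.foldl (fun o v =>
        match o with
        | none => some v
        | some b => some (max b v)) best := by
  unfold pvParse
  by_cases h : ((PySem.Str.split? f "_").getD []).length > 1
  · simp only [h, if_pos]
    cases PySem.Int.ofStr? (PySem.List.pyGetD ((PySem.Str.split? f "_").getD []) 1 "") <;>
      cases best <;> simp
  · simp [h]

lemma a_fold_eq (L : List String) (acc : List Int) :
    L.foldl (fun acc _folder =>
      let _folder_split := (PySem.Str.split? _folder "_").getD []
      if _folder_split.length > 1 then
        match PySem.Int.ofStr? (PySem.List.pyGetD _folder_split 1 "") with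
        | some n => acc ++ [n]
        | none => acc
      else acc) acc = acc ++ L.filterMap pvParse := by
  induction L generalizing acc with
  | nil => simp
  | cons f t ih =>
    simp only [List.foldl_cons, List.filterMap_cons]
    rw [stepA_eq]
    cases h : pvParse f <;> simp [ih]

lemma b_fold_eq (L : List String) (best : Option Int) :
    L.foldl (fun best folder =>
      let parts := (PySem.Str.split? folder "_").getD []
      if parts.length > 1 then
        match PySem.Int.ofStr? (PySem.List.pyGetD parts 1 "") with
        | some value =>
            match best with
            | none => some value
            | some b => some (max b value)
        | none => best
      else best) best =
    (L.filterMap pvParse).foldl (fun o v =>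
        match o with
        | none => some v
        | some b => some (max b v)) best := by
  induction L generalizing best with
  | nil => simp
  | cons f t ih =>
    simp only [List.foldl_cons, List.filterMap_cons]
    rw [stepB_eq]
    cases h : pvParse f <;> simp [ih]

lemma omax_fold_some (L : List Int) (b : Int) :
    L.foldl (fun o v =>
        match o with
        | none => some v
        | some b => some (max b v)) (some b) = some (L.foldl max b) := by
  induction L generalizing b with
  | nil => rfl
  | cons x t ih => simp [List.foldl_cons, ih]

lemma init_le_foldl_max (L : List Int) (b : Int) : b ≤ L.foldl max b := by
  induction L generalizing b with
  | nil => exact le_refl b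
  | cons x t ih => exact le_trans (le_max_left b x) (ih (max b x))

lemma mem_le_foldl_max (L : List Int) (b x : Int) (hx : x ∈ L) : x ≤ L.foldl max b := by
  induction L generalizing b with
  | nil => simp at hx
  | cons y t ih =>
    rw [List.foldl_cons]
    rcases List.mem_cons.1 hx with rfl | h
    · exact le_trans (le_max_right b x) (init_le_foldl_max t _)
    · exact ih (max b y) h

lemma foldl_max_mem (L : List Int) (b : Int) : L.foldl max b ∈ b :: L := by
  induction L generalizing b with
  | nil => simp
  | cons x t ih =>
    rw [List.foldl_cons]
    rcases List.mem_cons.1 (ih (max b x)) with h | h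
    · rcases max_choice b x with h' | h' <;> rw [h, h'] <;> simp
    · simp [h]

lemma le_getLast_of_pairwise (S : List Int) :
    S.Pairwise (· ≤ ·) → ∀ (hne : S ≠ []) (x : Int), x ∈ S → x ≤ S.getLast hne := by
  induction S with
  | nil => intro _ hne; simp at hne
  | cons a t ih =>
    intro h hne x hx
    cases t with
    | nil => simp_all
    | cons b u =>
      rw [List.getLast_cons (by simp)]
      rcases List.mem_cons.1 hx with rfl | hx'
      · exact (List.pairwise_cons.1 h).1 _ (List.getLast_mem _)
      · exact ih (List.pairwise_cons.1 h).2 (by simp) x hx'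

/-- Last element of the sorted list is the fold-max. -/
lemma sorted_last_eq_max (b : Int) (t : List Int) :
    PySem.List.pyGetD (PySem.List.sorted (b :: t) id) (-1) 0 = t.foldl max b := by
  have hperm := PySem.List.sorted_perm (b :: t) (id : Int → Int) false
  have hne : PySem.List.sorted (b :: t) id ≠ [] := by
    intro h
    rw [h] at hperm
    exact absurd hperm.symm.length_eq (by simp)
  rw [PySem.List.pyGetD_neg_one _ _ hne]
  have hpw : (PySem.List.sorted (b :: t) id).Pairwise (· ≤ ·) := by
    simpa using PySem.List.sorted_pairwise (b :: t) (id : Int → Int)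
  apply le_antisymm
  · have hmem := hperm.mem_iff.1 (List.getLast_mem hne)
    rcases List.mem_cons.1 hmem with h | h
    · rw [h]; exact init_le_foldl_max t b
    · exact mem_le_foldl_max t b _ h
  · exact le_getLast_of_pairwise _ hpw hne _ (hperm.mem_iff.2 (foldl_max_mem t b))

-- ===== VERDICT (by name: the statement is the Claim_ definition above) =====
theorem retrieve_last_incremented_index_spec : Claim_equal_retrieve_last_incremented_index := by
  intro L _
  unfold Spec_retrieve_last_incremented_index retrieve_last_incremented_index
    retrieve_last_incremented_index_alt
  simp only [a_fold_eq, b_fold_eq, List.nil_append]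
  cases h : L.filterMap pvParse with
  | nil => simp
  | cons b t =>
    rw [List.foldl_cons]
    simp only [omax_fold_some, if_neg (by simp : b :: t ≠ [])]
    rw [sorted_last_eq_max]
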